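-- pv_equiv track=rewrite | github.com/Davidjmz12/EatEasy | super/views.py | getNumberNamesPrice
-- ===== SOURCE A (Python) =====
-- def getNumberNamesPrice(prices):
--     maxPrice = max(prices)
--     number = []
--     names = []
--     for m in range(int(maxPrice / 5) + 1):
--         n = 0
--         for i in range(len(prices)):
--             if 5 * (m + 1) > prices[i] >= 5 * m:
--                 n = n + 1
--         names.append(5 * m)
--         number.append(n)
--     return number, names
-- ===== SOURCE B (Python) =====
-- def getNumberNamesPrice(prices):
--     counts = {}
--     for p in prices:
--         b = p // 5
--         counts[b] = counts.get(b, 0) + 1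
--     buckets = range(max(prices) // 5 + 1)
--     return [counts.get(m, 0) for m in buckets], [5 * m for m in buckets]
-- ===== Notes on version B (the rewrite author's own statement) =====
-- stated objective: faster
-- what changed: Replaces A's per-bucket full rescan of the price list by a single counting pass into a floor-division bucket dict, then one sweep over the bucket range reading each count with a lookup.
-- intended difference: On nonempty lists whose maximum is between -4 and -1, A's int(maxPrice/5) truncates toward zero and A returns ([0],[0]) — a spurious empty bucket [0,5) containing no price — while B returns ([],[]), the intended empty histogram, since no price reaches any nonnegative bucket. — e.g. on getNumberNamesPrice([-3]): A returns ([0], [0]), B returns ([], [])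
import Mathlib
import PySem

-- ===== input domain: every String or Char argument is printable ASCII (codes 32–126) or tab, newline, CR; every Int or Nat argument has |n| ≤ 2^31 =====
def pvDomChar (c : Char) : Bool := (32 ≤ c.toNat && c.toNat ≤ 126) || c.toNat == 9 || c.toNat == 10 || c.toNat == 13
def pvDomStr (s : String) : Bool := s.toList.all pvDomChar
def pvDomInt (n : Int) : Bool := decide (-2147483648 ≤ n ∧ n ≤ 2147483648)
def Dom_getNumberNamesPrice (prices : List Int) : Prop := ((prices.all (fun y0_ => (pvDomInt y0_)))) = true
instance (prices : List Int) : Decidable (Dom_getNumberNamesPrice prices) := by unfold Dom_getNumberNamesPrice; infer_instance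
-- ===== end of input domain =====

-- B replaces A's per-bucket full rescan of the price list by one counting pass into a
-- floor-division bucket dict plus a single sweep over the bucket indices (objective: faster).

-- ===== PORT A =====
def getNumberNamesPrice (prices : List Int) : List Int × List Int :=
  match PySem.List.max? prices (fun y => y) with
  | none => ([], [])  -- unreachable under Pre_ (Python raises ValueError on [])
  | some maxPrice =>
    (PySem.List.pyRange 0 (PySem.Int.truncdiv maxPrice 5 + 1) 1).foldl
      (fun (acc : List Int × List Int) m =>
        let n : Int :=
          (PySem.List.pyRange 0 (prices.length : Int) 1).foldl
            (fun n i =>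
              if 5 * (m + 1) > PySem.List.pyGetD prices i 0 ∧ PySem.List.pyGetD prices i 0 ≥ 5 * m
              then n + 1 else n) 0
        (acc.1 ++ [n], acc.2 ++ [5 * m]))
      ([], [])

-- ===== PORT B =====
def getNumberNamesPrice_alt (prices : List Int) : List Int × List Int :=
  let counts := prices.foldl
    (fun (d : PySem.Dict Int Int) p =>
      let b := PySem.Int.floordiv p 5
      d.insert b (d.getD b 0 + 1)) PySem.Dict.empty
  match PySem.List.max? prices (fun y => y) with
  | none => ([], [])  -- unreachable under Pre_ (Python raises ValueError on [])
  | some maxPrice =>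
    let buckets := PySem.List.pyRange 0 (PySem.Int.floordiv maxPrice 5 + 1) 1
    (buckets.map (fun m => counts.getD m 0), buckets.map (fun m => 5 * m))

-- ===== PRECONDITION & SPEC =====
-- Pre_ excludes the empty list, on which Python's max() raises ValueError in both A and B.
def Pre_getNumberNamesPrice (prices : List Int) : Prop := prices ≠ []
instance (prices : List Int) : Decidable (Pre_getNumberNamesPrice prices) := by unfold Pre_getNumberNamesPrice; infer_instance
def pvWitness_getNumberNamesPrice : List Int := [3, -7, 12, 12, 0]

-- On lists whose maximum is between -4 and -1, A's int(maxPrice/5) truncates toward zero and A returns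
-- ([0],[0]) — a spurious empty bucket [0,5) containing no price — while B returns ([],[]), the
-- intended empty histogram, since no price reaches any nonnegative bucket.
def D_getNumberNamesPrice (prices : List Int) : Prop :=
  prices ≠ [] ∧ (∀ p ∈ prices, p ≤ -1) ∧ (∃ p ∈ prices, -4 ≤ p)
instance (prices : List Int) : Decidable (D_getNumberNamesPrice prices) := by unfold D_getNumberNamesPrice; infer_instance

def Spec_getNumberNamesPrice (prices : List Int) (out : List Int × List Int) : Prop :=
  ¬ D_getNumberNamesPrice prices → out = getNumberNamesPrice_alt prices
instance (prices : List Int) (out : List Int × List Int) : Decidable (Spec_getNumberNamesPrice prices out) := by unfold Spec_getNumberNamesPrice; infer_instance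

def pvDiffWitness_getNumberNamesPrice : List Int := [-3]
def pvDiffWitnessOut_getNumberNamesPrice : (List Int × List Int) × (List Int × List Int) :=
  (([0], [0]), ([], []))

-- ===== CLAIM (what is proved, stated in full; the proofs are below) =====
def Claim_unchanged_getNumberNamesPrice : Prop := ∀ (prices : List Int), Dom_getNumberNamesPrice prices → Pre_getNumberNamesPrice prices → Spec_getNumberNamesPrice prices (getNumberNamesPrice prices)
def Claim_changed_getNumberNamesPrice : Prop := Dom_getNumberNamesPrice (pvDiffWitness_getNumberNamesPrice) ∧ Pre_getNumberNamesPrice (pvDiffWitness_getNumberNamesPrice) ∧ D_getNumberNamesPrice (pvDiffWitness_getNumberNamesPrice) ∧ getNumberNamesPrice (pvDiffWitness_getNumberNamesPrice) = pvDiffWitnessOut_getNumberNamesPrice.1 ∧ getNumberNamesPrice_alt (pvDiffWitness_getNumberNamesPrice) = pvDiffWitnessOut_getNumberNamesPrice.2 ∧ pvDiffWitnessOut_getNumberNamesPrice.1 ≠ pvDiffWitnessOut_getNumberNamesPrice.2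
def Claim_exact_getNumberNamesPrice : Prop := ∀ (prices : List Int), Dom_getNumberNamesPrice prices → Pre_getNumberNamesPrice prices → D_getNumberNamesPrice prices → getNumberNamesPrice prices ≠ getNumberNamesPrice_alt prices

-- ===== LEMMAS AND PROOFS =====

-- range(b) is empty when b ≤ 0
theorem pv_pyRange_nil (b : Int) (h : b ≤ 0) : PySem.List.pyRange 0 b 1 = [] := by
  have h0 : (b - 0).toNat = 0 := by omega
  rw [PySem.List.pyRange_one, h0]
  simp

-- A's inner bracket test is exactly "floor-division bucket = m"
theorem pv_bucket_iff (p m : Int) :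
    (5 * (m + 1) > p ∧ p ≥ 5 * m) ↔ PySem.Int.floordiv p 5 = m := by
  rw [PySem.Int.floordiv_eq_iff_of_pos (by norm_num : (0:Int) < 5)]
  omega

-- A's inner loop counts the prices whose bucket is m; B's dict lookup returns the same count
theorem pv_inner_eq (prices : List Int) (m : Int) :
    (PySem.List.pyRange 0 (prices.length : Int) 1).foldl
      (fun (n : Int) i =>
        if 5 * (m + 1) > PySem.List.pyGetD prices i 0 ∧ PySem.List.pyGetD prices i 0 ≥ 5 * m
        then n + 1 else n) 0
    = (prices.foldl
        (fun (d : PySem.Dict Int Int) p =>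
          let b := PySem.Int.floordiv p 5
          d.insert b (d.getD b 0 + 1)) PySem.Dict.empty).getD m 0 := by
  have hfold : (prices.foldl
        (fun (d : PySem.Dict Int Int) p =>
          let b := PySem.Int.floordiv p 5
          d.insert b (d.getD b 0 + 1)) PySem.Dict.empty)
      = ((prices.map (fun p => PySem.Int.floordiv p 5)).foldl
          (fun (d : PySem.Dict Int Int) b => d.insert b (d.getD b 0 + 1)) PySem.Dict.empty) := by
    rw [List.foldl_map]
  rw [hfold]
  rw [PySem.List.foldl_pyRange_zero_pyGetD' prices 0
        (fun (n : Int) p => if 5 * (m + 1) > p ∧ p ≥ 5 * m then n + 1 else n) 0,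
      PySem.Dict.getD_foldl_insert_add_one, PySem.Dict.getD_empty,
      PySem.List.foldl_ite_add_one (fun p => 5 * (m + 1) > p ∧ p ≥ 5 * m) prices 0]
  rw [List.count_eq_countP, List.countP_map]
  have : prices.countP ((fun b => b == m) ∘ fun p => PySem.Int.floordiv p 5)
       = prices.countP (fun p => decide (5 * (m + 1) > p ∧ p ≥ 5 * m)) := by
    apply List.countP_congr
    intro p _
    simp [Function.comp, pv_bucket_iff]
  omega

-- A's outer loop over a given range produces exactly B's two maps over that range
theorem pv_outer_eq (prices : List Int) (rng : List Int) :
    rng.foldl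
      (fun (acc : List Int × List Int) m =>
        let n : Int :=
          (PySem.List.pyRange 0 (prices.length : Int) 1).foldl
            (fun n i =>
              if 5 * (m + 1) > PySem.List.pyGetD prices i 0 ∧ PySem.List.pyGetD prices i 0 ≥ 5 * m
              then n + 1 else n) 0
        (acc.1 ++ [n], acc.2 ++ [5 * m]))
      ([], [])
    = (rng.map (fun m =>
         (prices.foldl
           (fun (d : PySem.Dict Int Int) p =>
             let b := PySem.Int.floordiv p 5
             d.insert b (d.getD b 0 + 1)) PySem.Dict.empty).getD m 0),
       rng.map (fun m => 5 * m)) := by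
  rw [PySem.List.foldl_prod_mk
        (f := fun (acc : List Int) m =>
          acc ++ [(PySem.List.pyRange 0 (prices.length : Int) 1).foldl
            (fun n i =>
              if 5 * (m + 1) > PySem.List.pyGetD prices i 0 ∧ PySem.List.pyGetD prices i 0 ≥ 5 * m
              then n + 1 else n) 0])
        (g := fun (acc : List Int) m => acc ++ [5 * m])]
  rw [PySem.List.foldl_append_singleton_eq_map, PySem.List.foldl_append_singleton_eq_map]
  simp only [List.nil_append]
  congr 1
  apply List.map_congr_left
  intro m _
  exact pv_inner_eq prices m

-- the maximum of a nonempty list sits between -4 and -1 exactly when D_ holds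
theorem pv_D_iff_max (prices : List Int) (M : Int)
    (h : PySem.List.max? prices (fun y => y) = some M) :
    D_getNumberNamesPrice prices ↔ (-4 ≤ M ∧ M ≤ -1) := by
  have hmem : M ∈ prices := PySem.List.max?_mem h
  have hmax : ∀ y ∈ prices, y ≤ M := fun y hy => PySem.List.max?_isMax h y hy
  constructor
  · rintro ⟨-, hall, p, hp, hpge⟩
    exact ⟨le_trans hpge (hmax p hp), hall M hmem⟩
  · rintro ⟨h4, h1⟩
    exact ⟨by rintro rfl; simp at hmem,
           fun p hp => le_trans (hmax p hp) h1, M, hmem, h4⟩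

-- ===== VERDICT (by name: the statement is the Claim_ definition above) =====
theorem getNumberNamesPrice_spec : Claim_unchanged_getNumberNamesPrice := by
  intro prices _ hpre hnd
  unfold getNumberNamesPrice getNumberNamesPrice_alt
  cases hmax : PySem.List.max? prices (fun y => y) with
  | none => rfl
  | some M =>
    simp only []
    rw [pv_outer_eq]
    have hM : ¬ (-4 ≤ M ∧ M ≤ -1) := fun h => hnd ((pv_D_iff_max prices M hmax).2 h)
    by_cases h0 : 0 ≤ M
    · rw [show PySem.Int.truncdiv M 5 = PySem.Int.floordiv M 5 by
        simp [PySem.Int.truncdiv, PySem.Int.floordiv, Int.tdiv_eq_ediv_of_nonneg h0,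
              Int.fdiv_eq_ediv]]
    · -- M ≤ -5: both ranges are empty
      have h5 : M ≤ -5 := by omega
      have ht : PySem.Int.truncdiv M 5 + 1 ≤ 0 := by
        have h1 : M.tdiv 5 ≤ -1 := by
          have := Int.tdiv_le_tdiv (by norm_num : (0:Int) < 5) h5
          simpa using this
        simp only [PySem.Int.truncdiv]
        omega
      have hf : PySem.Int.floordiv M 5 + 1 ≤ 0 := by
        simp [PySem.Int.floordiv, Int.fdiv_eq_ediv]
        omega
      rw [pv_pyRange_nil _ ht, pv_pyRange_nil _ hf]

theorem getNumberNamesPrice_changed : Claim_changed_getNumberNamesPrice := by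
  unfold Claim_changed_getNumberNamesPrice; decide

theorem getNumberNamesPrice_tight : Claim_exact_getNumberNamesPrice := by
  intro prices _ hpre hd
  cases hmax : PySem.List.max? prices (fun y => y) with
  | none => exact absurd ((PySem.List.max?_eq_none_iff _ _).1 hmax) hpre
  | some M =>
    have hM := (pv_D_iff_max prices M hmax).1 hd
    have hall := hd.2.1
    unfold getNumberNamesPrice getNumberNamesPrice_alt
    rw [hmax]
    simp only []
    rw [pv_outer_eq]
    obtain ⟨hM4, hM1⟩ := hM
    have ht : PySem.Int.truncdiv M 5 = 0 := by
      simp only [PySem.Int.truncdiv]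
      interval_cases M <;> decide
    have hf : PySem.Int.floordiv M 5 = -1 := by
      simp [PySem.Int.floordiv, Int.fdiv_eq_ediv]
      omega
    rw [ht, hf]
    rw [show (-1 : Int) + 1 = 0 from by norm_num, pv_pyRange_nil 0 (le_refl 0)]
    rw [show (0 : Int) + 1 = 1 from by norm_num]
    have h01 : PySem.List.pyRange 0 1 1 = [0] := by decide
    rw [h01]
    simp
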